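-- pv_equiv track=rewrite | github.com/Chaebin-Kim24/python_class_SKU2024-04 | 성적확인용/숙제/4,5장/숙제_4,5장_2021304061.py | count_males_females
-- ===== SOURCE A (Python) =====
-- def count_males_females(person_list):
--     n_male = 0
--     n_female = 0
--
--     for i in range(2, len(person_list), 5):
--         if person_list[i] == 1:
--             n_male += 1
--         elif person_list[i] == 0:
--             n_female += 1
--
--     return n_male,n_female
-- ===== SOURCE B (Python) =====
-- def count_males_females(person_list):
--     sub = person_list[2::5]
--     return sub.count(1), sub.count(0)
-- ===== Notes on version B (the rewrite author's own statement) =====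
-- stated objective: simpler
-- what changed: Replaces the branching index loop over range(2, len, 5) with building the strided sublist person_list[2::5] once and taking two .count passes over it.
import Mathlib
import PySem

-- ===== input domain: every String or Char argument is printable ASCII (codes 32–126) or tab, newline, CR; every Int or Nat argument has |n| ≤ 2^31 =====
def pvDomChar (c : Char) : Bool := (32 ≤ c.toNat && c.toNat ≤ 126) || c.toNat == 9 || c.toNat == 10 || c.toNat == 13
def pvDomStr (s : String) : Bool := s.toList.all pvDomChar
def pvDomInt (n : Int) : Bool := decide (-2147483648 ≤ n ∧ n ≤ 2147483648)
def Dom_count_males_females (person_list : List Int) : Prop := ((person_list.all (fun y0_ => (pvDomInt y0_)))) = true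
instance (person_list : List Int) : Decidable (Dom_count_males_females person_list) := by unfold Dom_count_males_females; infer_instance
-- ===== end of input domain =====

-- B builds the strided sublist person_list[2::5] once and counts 1s and 0s with two count passes,
-- instead of A's single branching loop over range(2, len, 5): simpler decomposition, same O(n) cost.


-- ===== PORT A =====
-- literal port of A: n_male/n_female accumulators, one branching loop over range(2, len, 5)
def count_males_females (person_list : List Int) : Int × Int :=
  (PySem.List.pyRange 2 (person_list.length : Int) 5).foldl
    (fun p i =>
      if PySem.List.pyGetD person_list i 0 == 1 then (p.1 + 1, p.2)
      else if PySem.List.pyGetD person_list i 0 == 0 then (p.1, p.2 + 1)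
      else p)
    (0, 0)

-- ===== PORT B =====
-- literal port of Source B: sub = person_list[2::5]; return sub.count(1), sub.count(0)
-- (slice? is none only for step 0; the step here is the literal 5, so the none branch is unreachable)
def count_males_females_alt (person_list : List Int) : Int × Int :=
  match PySem.List.slice? person_list (some 2) none 5 with
  | none => (0, 0)
  | some sub => ((PySem.List.count sub 1 : Int), (PySem.List.count sub 0 : Int))

-- ===== PRECONDITION & SPEC =====
def Spec_count_males_females (person_list : List Int) (out : Int × Int) : Prop := out = count_males_females_alt person_list
instance (person_list : List Int) (out : Int × Int) : Decidable (Spec_count_males_females person_list out) := by unfold Spec_count_males_females; infer_instance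

-- ===== CLAIM (what is proved, stated in full; the proofs are below) =====
def Claim_equal_count_males_females : Prop := ∀ (person_list : List Int), Dom_count_males_females person_list → Spec_count_males_females person_list (count_males_females person_list)

-- ===== LEMMAS AND PROOFS =====

-- the strided slice xs[2::5] is the list of values read at the indices A's loop visits
lemma slice_eq_map_pyRange (xs : List Int) :
    PySem.List.slice? xs (some 2) none 5 =
      some ((PySem.List.pyRange 2 (xs.length : Int) 5).map (fun i => PySem.List.pyGetD xs i 0)) := by
  simp only [PySem.List.slice?, PySem.List.sliceIndices, PySem.List.pyRange]
  norm_num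
  by_cases h : 2 < xs.length
  · rw [min_eq_left (by exact_mod_cast Nat.le_of_lt h)]
    apply List.filterMap_eq_map_iff_forall_eq_some.mpr
    intro k hk
    simp only [List.mem_range, if_pos h] at hk
    have hb : (2 : Int) + 5 * (k : Int) < (xs.length : Int) := by omega
    rw [Function.comp_apply, PySem.List.pyGetD_eq_getElem xs 0 (by omega) hb,
      List.getElem?_eq_getElem (by omega)]
  · simp [h]

-- A's branching loop accumulates exactly the two value-counts of the traversed list
lemma loopA (l : List Int) (a b : Int) :
    l.foldl
      (fun p x =>
        if x == 1 then (p.1 + 1, p.2)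
        else if x == 0 then (p.1, p.2 + 1)
        else p) (a, b)
    = (a + (l.count 1 : Int), b + (l.count 0 : Int)) := by
  induction l generalizing a b with
  | nil => simp
  | cons x t ih =>
    rw [List.foldl_cons]
    by_cases h1 : x = 1
    · rw [if_pos (by simp [h1]), ih]
      simp [h1, Prod.ext_iff]
      ring
    · rw [if_neg (by simp [h1])]
      by_cases h0 : x = 0
      · rw [if_pos (by simp [h0]), ih]
        simp [h0, Prod.ext_iff]
        ring
      · rw [if_neg (by simp [h0]), ih]
        simp [h0, h1]


-- ===== VERDICT (by name: the statement is the Claim_ definition above) =====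
theorem count_males_females_spec : Claim_equal_count_males_females := by
  intro xs _
  unfold Spec_count_males_females count_males_females count_males_females_alt
  rw [slice_eq_map_pyRange]
  have h := loopA ((PySem.List.pyRange 2 (xs.length : Int) 5).map (fun i => PySem.List.pyGetD xs i 0)) 0 0
  rw [List.foldl_map] at h
  rw [h]
  simp [PySem.List.count_eq]
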